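-- pv_equiv track=rewrite | github.com/retea-se/topo | scripts/qa_doc_audit.py | is_archive_path
-- ===== SOURCE A (Python) =====
-- ARCHIVE_PATHS = [
--     'docs/archive/',
--     '**/archive/',
-- ]
--
-- def is_archive_path(path: str) -> bool:
--     """Check if a path is in an archive directory."""
--     normalized = path.replace('\\', '/')
--     for archive in ARCHIVE_PATHS:
--         if archive.startswith('**/'):
--             # Match anywhere in path
--             pattern = archive[3:]
--             if pattern in normalized:
--                 return True
--         elif archive in normalized:
--             return True
--     return False
-- ===== SOURCE B (Python) =====
-- def is_archive_path(path: str) -> bool: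
--     """Check if a path is in an archive directory."""
--     return 'archive/' in path.replace('\\', '/')
-- ===== Notes on version B (the rewrite author's own statement) =====
-- stated objective: simpler
-- what changed: The loop over the two patterns collapses to a single substring test: 'docs/archive/' occurring in the normalized path implies 'archive/' occurring in it, so B just checks 'archive/' in path.replace('\\','/').
import Mathlib
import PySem

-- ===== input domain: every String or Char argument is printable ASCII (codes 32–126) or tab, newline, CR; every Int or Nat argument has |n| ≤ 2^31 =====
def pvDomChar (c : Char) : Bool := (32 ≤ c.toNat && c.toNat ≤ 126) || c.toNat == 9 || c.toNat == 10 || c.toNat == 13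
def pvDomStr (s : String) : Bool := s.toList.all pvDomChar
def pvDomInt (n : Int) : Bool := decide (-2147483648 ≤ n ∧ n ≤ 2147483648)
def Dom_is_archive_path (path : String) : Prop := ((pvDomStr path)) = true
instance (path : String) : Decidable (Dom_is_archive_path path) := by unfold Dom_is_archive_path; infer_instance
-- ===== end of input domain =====

-- B replaces A's loop over the two patterns by the single equivalent substring test ('simpler').

-- ===== PORT A =====
def ARCHIVE_PATHS : List String := ["docs/archive/", "**/archive/"]

-- the for-loop over ARCHIVE_PATHS with early return
def is_archive_path_go (pats : List String) (normalized : String) : Bool :=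
  match pats with
  | [] => false
  | archive :: rest =>
    if PySem.Str.startswith archive "**/" then
      let pattern := PySem.Str.slice archive (some 3) none
      if PySem.Str.isIn pattern normalized then true
      else is_archive_path_go rest normalized
    else if PySem.Str.isIn archive normalized then true
    else is_archive_path_go rest normalized

def is_archive_path (path : String) : Bool :=
  let normalized := PySem.Str.replace path "\\" "/"
  is_archive_path_go ARCHIVE_PATHS normalized

-- ===== PORT B =====
def is_archive_path_alt (path : String) : Bool :=
  PySem.Str.isIn "archive/" (PySem.Str.replace path "\\" "/")

-- ===== PRECONDITION & SPEC =====
def Spec_is_archive_path (path : String) (out : Bool) : Prop := out = is_archive_path_alt path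
instance (path : String) (out : Bool) : Decidable (Spec_is_archive_path path out) := by unfold Spec_is_archive_path; infer_instance

-- ===== CLAIM (what is proved, stated in full; the proofs are below) =====
def Claim_equal_is_archive_path : Prop := ∀ (path : String), Dom_is_archive_path path → Spec_is_archive_path path (is_archive_path path)

-- ===== LEMMAS AND PROOFS =====

-- "docs/archive/" in n implies "archive/" in n (infix transitivity)
lemma docs_archive_sub (n : String) (h : PySem.Str.isIn "docs/archive/" n = true) :
    PySem.Str.isIn "archive/" n = true := by
  rw [PySem.Str.isIn_iff_infix] at h ⊢
  exact List.IsInfix.trans (by decide) h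

lemma go_eq (n : String) :
    is_archive_path_go ARCHIVE_PATHS n = PySem.Str.isIn "archive/" n := by
  simp only [is_archive_path_go, ARCHIVE_PATHS,
    show PySem.Str.startswith "docs/archive/" "**/" = false from by decide,
    show PySem.Str.startswith "**/archive/" "**/" = true from by decide,
    show PySem.Str.slice "**/archive/" (some 3) none = "archive/" from by decide,
    Bool.false_eq_true, if_false, if_true]
  cases h : PySem.Str.isIn "docs/archive/" n with
  | true => simpa using docs_archive_sub n h
  | false =>
    simp only [Bool.false_eq_true, if_false]
    cases PySem.Chars.isIn "archive/".toList n.toList <;> simp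

-- ===== VERDICT (by name: the statement is the Claim_ definition above) =====
theorem is_archive_path_spec : Claim_equal_is_archive_path := by
  intro path _
  unfold Spec_is_archive_path is_archive_path is_archive_path_alt
  exact go_eq _
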